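-- pv_equiv track=rewrite | github.com/cote-to-job/ha6oon | programmers_codechallenge_2_완전범죄.py | solution
-- ===== SOURCE A (Python) =====
-- def solution(info, n, m):
--     # 초기값: B의 흔적 합에 대한 최소 A의 흔적 합
--     dp = {0: 0}  # key: b_sum (B의 흔적 누적값), value: 최소 A의 흔적 합
--
--     for a_trace, b_trace in info:
--         next_dp = dict()
--         for b_sum, a_sum in dp.items():
--             # Case 1: 현재 물건을 A가 훔치는 경우
--             new_a_sum = a_sum + a_trace
--             new_b_sum = b_sum
--             if new_a_sum < n and new_b_sum < m:
--                 if new_b_sum not in next_dp or next_dp[new_b_sum] > new_a_sum: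
--                     next_dp[new_b_sum] = new_a_sum
--
--             # Case 2: 현재 물건을 B가 훔치는 경우
--             new_a_sum = a_sum
--             new_b_sum = b_sum + b_trace
--             if new_a_sum < n and new_b_sum < m:
--                 if new_b_sum not in next_dp or next_dp[new_b_sum] > new_a_sum:
--                     next_dp[new_b_sum] = new_a_sum
--
--         dp = next_dp  # 다음 단계로 갱신
--
--     # 가능한 결과 중 A의 흔적 합의 최솟값 찾기
--     return min(dp.values()) if dp else -1
-- ===== SOURCE B (Python) =====
-- def solution(info, n, m):
--     # top-down memoized recursion over the suffix of items still to assign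
--     memo = {}
--
--     def best(items, a_sum, b_sum):
--         key = (len(items), a_sum, b_sum)
--         if key in memo:
--             return memo[key]
--         if not items:
--             memo[key] = a_sum
--             return a_sum
--         a_t, b_t = items[0]
--         rest = items[1:]
--         res = None
--         if a_sum + a_t < n and b_sum < m:
--             r = best(rest, a_sum + a_t, b_sum)
--             if r is not None and (res is None or r < res):
--                 res = r
--         if a_sum < n and b_sum + b_t < m:
--             r = best(rest, a_sum, b_sum + b_t)
--             if r is not None and (res is None or r < res):
--                 res = r
--         memo[key] = res
--         return res
--
--     r = best(info, 0, 0)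
--     return -1 if r is None else r
-- ===== Notes on version B (the rewrite author's own statement) =====
-- stated objective: alternative
-- what changed: Replaces the bottom-up dict DP (b_sum -> minimal a_sum, rebuilt item by item with min-keeping inserts) by a top-down memoized recursion best(items, a_sum, b_sum) that returns the minimal final a_sum reachable from that state, with a dict memo keyed on (len(items), a_sum, b_sum).
import Mathlib
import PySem

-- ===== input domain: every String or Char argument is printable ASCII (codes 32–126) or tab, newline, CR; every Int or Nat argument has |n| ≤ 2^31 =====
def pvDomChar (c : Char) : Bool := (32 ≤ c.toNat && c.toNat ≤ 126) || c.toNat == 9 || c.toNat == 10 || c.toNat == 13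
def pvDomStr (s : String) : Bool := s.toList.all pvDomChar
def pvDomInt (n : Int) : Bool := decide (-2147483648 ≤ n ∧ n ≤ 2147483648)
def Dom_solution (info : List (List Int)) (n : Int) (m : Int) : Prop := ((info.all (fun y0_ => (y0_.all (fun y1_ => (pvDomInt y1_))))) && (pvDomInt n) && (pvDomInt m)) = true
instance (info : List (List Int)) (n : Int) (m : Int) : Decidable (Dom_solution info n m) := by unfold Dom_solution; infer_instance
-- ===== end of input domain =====

-- B replaces A's bottom-up dict DP (b_sum -> min a_sum) by a top-down memoized recursion
-- over the remaining items; same return value on every input admitted by Pre_solution.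

-- ===== PORT A =====
-- 'if new_b_sum not in next_dp or next_dp[new_b_sum] > new_a_sum: next_dp[new_b_sum] = new_a_sum'
def updA (nd : PySem.Dict Int Int) (nb na : Int) : PySem.Dict Int Int :=
  match nd.get? nb with
  | none => nd.insert nb na
  | some v => if v > na then nd.insert nb na else nd

-- one iteration of 'for a_trace, b_trace in info' (rows that are not pairs raise ValueError:
-- excluded by Pre_solution)
def stepA (n m : Int) (dp : PySem.Dict Int Int) (item : List Int) : PySem.Dict Int Int :=
  match item with
  | [a_trace, b_trace] =>
    dp.items.foldl (fun next_dp p =>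
      let nd1 := if p.2 + a_trace < n ∧ p.1 < m then updA next_dp p.1 (p.2 + a_trace) else next_dp
      if p.2 < n ∧ p.1 + b_trace < m then updA nd1 (p.1 + b_trace) p.2 else nd1)
      PySem.Dict.empty
  | _ => dp

def solution (info : List (List Int)) (n : Int) (m : Int) : Int :=
  let dp := info.foldl (stepA n m) (PySem.Dict.empty.insert 0 0)
  match PySem.List.min? dp.values (fun x => x) with
  | some v => v
  | none => -1

-- ===== PORT B =====
-- 'if r is not None and (res is None or r < res): res = r'
def pyMinOpt (r res : Option Int) : Option Int :=
  match r, res with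
  | some x, none => some x
  | some x, some y => if x < y then some x else some y
  | none, res => res

abbrev Memo := PySem.Dict (Int × Int × Int) (Option Int)

def bestB (n m : Int) (items : List (List Int)) (a_sum b_sum : Int) (memo : Memo) :
    Option Int × Memo :=
  let key : Int × Int × Int := (PySem.List.len items, a_sum, b_sum)
  match memo.get? key with
  | some r => (r, memo)
  | none =>
    match items with
    | [] => (some a_sum, memo.insert key (some a_sum))
    | item :: rest =>
      match item with
      | [a_t, b_t] =>
        let p1 := if a_sum + a_t < n ∧ b_sum < m then bestB n m rest (a_sum + a_t) b_sum memo
                  else ((none : Option Int), memo)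
        let res1 := pyMinOpt p1.1 none
        let p2 := if a_sum < n ∧ b_sum + b_t < m then bestB n m rest a_sum (b_sum + b_t) p1.2
                  else ((none : Option Int), p1.2)
        let res2 := pyMinOpt p2.1 res1
        (res2, p2.2.insert key res2)
      | _ => (none, memo)   -- Python raises here (outside Pre_solution)
termination_by items.length
decreasing_by all_goals simp only [List.length_cons]; omega

def solution_alt (info : List (List Int)) (n : Int) (m : Int) : Int :=
  match (bestB n m info 0 0 PySem.Dict.empty).1 with
  | some v => v
  | none => -1

-- ===== PRECONDITION & SPEC =====
-- Pre_ excludes exactly the rows that are not two-element lists, on which A's tuple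
-- unpacking 'for a_trace, b_trace in info' raises ValueError (B raises there too).
def Pre_solution (info : List (List Int)) (_n : Int) (_m : Int) : Prop :=
  ∀ it ∈ info, it.length = 2
instance (info : List (List Int)) (n : Int) (m : Int) : Decidable (Pre_solution info n m) := by
  unfold Pre_solution; infer_instance

def pvWitness_solution : List (List Int) × Int × Int := ([[1, 2], [3, 1]], 5, 5)

def Spec_solution (info : List (List Int)) (n : Int) (m : Int) (out : Int) : Prop := out = solution_alt info n m
instance (info : List (List Int)) (n : Int) (m : Int) (out : Int) : Decidable (Spec_solution info n m out) := by unfold Spec_solution; infer_instance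

-- ===== CLAIM (what is proved, stated in full; the proofs are below) =====
def Claim_equal_solution : Prop := ∀ (info : List (List Int)) (n : Int) (m : Int), Dom_solution info n m → Pre_solution info n m → Spec_solution info n m (solution info n m)


-- ===== LEMMAS AND PROOFS =====

-- memoless value of B's recursion (proof-side characterisation)
def pureB (nn mm : Int) : List (List Int) → Int → Int → Option Int
  | [], a, _ => some a
  | item :: rest, a, b =>
    match item with
    | [a_t, b_t] =>
      pyMinOpt (if a < nn ∧ b + b_t < mm then pureB nn mm rest a (b + b_t) else none)
        (pyMinOpt (if a + a_t < nn ∧ b < mm then pureB nn mm rest (a + a_t) b else none) none)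
    | _ => none

-- order on Option Int with none = +infinity
def ole : Option Int → Option Int → Prop
  | _, none => True
  | none, some _ => False
  | some u, some v => u ≤ v

def omin (l : List (Option Int)) : Option Int := l.foldr pyMinOpt none

theorem pyMinOpt_none_right (r : Option Int) : pyMinOpt r none = r := by
  cases r <;> rfl

theorem pyMinOpt_none_left (r : Option Int) : pyMinOpt none r = r := rfl

theorem pyMinOpt_some_some (x y : Int) : pyMinOpt (some x) (some y) = some (min x y) := by
  simp only [pyMinOpt, min_def]; split_ifs <;> (try rfl) <;> (congr 1; omega)

theorem pyMinOpt_comm (x y : Option Int) : pyMinOpt x y = pyMinOpt y x := by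
  cases x <;> cases y <;> simp only [pyMinOpt] <;> split_ifs <;> simp_all <;> omega

theorem pyMinOpt_assoc (x y z : Option Int) :
    pyMinOpt (pyMinOpt x y) z = pyMinOpt x (pyMinOpt y z) := by
  cases x <;> cases y <;> cases z <;>
    simp only [pyMinOpt_some_some, pyMinOpt_none_left, pyMinOpt_none_right, min_assoc]

theorem ole_refl (x : Option Int) : ole x x := by cases x <;> simp [ole]

theorem ole_trans {x y z : Option Int} (h1 : ole x y) (h2 : ole y z) : ole x z := by
  cases x <;> cases y <;> cases z <;> simp_all [ole] <;> omega

theorem ole_pyMinOpt_left (x y : Option Int) : ole (pyMinOpt x y) x := by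
  cases x <;> cases y <;> simp [pyMinOpt, ole] <;> split_ifs <;> simp <;> omega

theorem ole_pyMinOpt_right (x y : Option Int) : ole (pyMinOpt x y) y := by
  rw [pyMinOpt_comm]; exact ole_pyMinOpt_left y x

theorem pyMinOpt_absorb {x y : Option Int} (h : ole x y) : pyMinOpt x y = x := by
  cases x <;> cases y <;> simp_all [pyMinOpt, ole] <;> omega

theorem pyMinOpt_mono {x x' y y' : Option Int} (hx : ole x x') (hy : ole y y') :
    ole (pyMinOpt x y) (pyMinOpt x' y') := by
  cases x <;> cases x' <;> cases y <;> cases y' <;>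
    simp_all [pyMinOpt, ole] <;> split_ifs <;> simp_all <;> omega

theorem omin_cons (x : Option Int) (l : List (Option Int)) :
    omin (x :: l) = pyMinOpt x (omin l) := rfl

theorem omin_append (l1 l2 : List (Option Int)) :
    omin (l1 ++ l2) = pyMinOpt (omin l1) (omin l2) := by
  induction l1 with
  | nil => simp [omin, pyMinOpt]
  | cons x t ih => simp only [List.cons_append, omin_cons, ih, pyMinOpt_assoc]

theorem omin_le_mem {x : Option Int} {l : List (Option Int)} (h : x ∈ l) : ole (omin l) x := by
  induction l with
  | nil => cases h
  | cons y t ih =>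
    rcases List.mem_cons.mp h with h | h
    · subst h; exact ole_pyMinOpt_left _ _
    · exact ole_trans (ole_pyMinOpt_right _ _) (ih h)

theorem omin_flatMap {α β : Type} (l : List α) (h : α → List β) (g : β → Option Int) :
    omin ((l.flatMap h).map g) = omin (l.map (fun x => omin ((h x).map g))) := by
  induction l with
  | nil => rfl
  | cons x t ih =>
    simp only [List.flatMap_cons, List.map_append, List.map_cons, omin_append, omin_cons, ih]

-- B's value is monotone in the accumulated a_sum
theorem ole_none_right (x : Option Int) : ole x none := by cases x <;> trivial

theorem pure_mono (nn mm : Int) (items : List (List Int)) :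
    ∀ a a' b, a ≤ a' → ole (pureB nn mm items a b) (pureB nn mm items a' b) := by
  induction items with
  | nil => intro a a' b h; simpa [pureB, ole] using h
  | cons item rest ih =>
    intro a a' b h
    rcases item with _ | ⟨x, _ | ⟨y, _ | ⟨z, t⟩⟩⟩ <;> simp only [pureB] <;>
      try exact ole_none_right none
    apply pyMinOpt_mono
    · by_cases hg : a' < nn ∧ b + y < mm
      · have hg' : a < nn ∧ b + y < mm := ⟨lt_of_le_of_lt h hg.1, hg.2⟩
        simp only [if_pos hg, if_pos hg']
        exact ih a a' (b + y) h
      · simp only [if_neg hg]; exact ole_none_right _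
    · apply pyMinOpt_mono _ (ole_refl none)
      by_cases hg : a' + x < nn ∧ b < mm
      · have hg' : a + x < nn ∧ b < mm := ⟨by omega, hg.2⟩
        simp only [if_pos hg, if_pos hg']
        exact ih (a + x) (a' + x) b (by omega)
      · simp only [if_neg hg]; exact ole_none_right _

-- min-absorption rearrangement used when updA overwrites an existing key
theorem pyMinOpt_alg {A B y y' : Option Int} (h : ole y' y) :
    pyMinOpt (pyMinOpt A (pyMinOpt y B)) y' = pyMinOpt A (pyMinOpt y' B) := by
  have h1 : pyMinOpt y y' = y' := by rw [pyMinOpt_comm]; exact pyMinOpt_absorb h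
  calc pyMinOpt (pyMinOpt A (pyMinOpt y B)) y'
      = pyMinOpt A (pyMinOpt (pyMinOpt y B) y') := by rw [pyMinOpt_assoc]
    _ = pyMinOpt A (pyMinOpt (pyMinOpt y y') B) := by
        rw [pyMinOpt_assoc, pyMinOpt_assoc, pyMinOpt_comm B y']
    _ = pyMinOpt A (pyMinOpt y' B) := by rw [h1]

theorem keys_updA (d : PySem.Dict Int Int) (b a : Int) :
    (updA d b a).keys = PySem.Set.add d.keys b := by
  cases h : d.get? b with
  | none =>
    have hc : d.contains b = false := by rw [PySem.Dict.contains_eq_isSome_get?, h]; rfl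
    have hb : b ∉ d.keys := fun hm =>
      by simp [(PySem.Dict.contains_iff_mem_keys d b).mpr hm] at hc
    simp only [updA, h]
    rw [PySem.Dict.keys_insert_of_not_contains d a hc, PySem.Set.add_of_not_mem hb]
  | some v =>
    have hc : d.contains b = true := by rw [PySem.Dict.contains_eq_isSome_get?, h]; rfl
    have hb : b ∈ d.keys := (PySem.Dict.contains_iff_mem_keys d b).mp hc
    simp only [updA, h]
    by_cases hv : v > a
    · simp only [if_pos hv]
      rw [PySem.Dict.keys_insert_of_contains d a hc, PySem.Set.add_of_mem hb]
    · simp only [if_neg hv]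
      rw [PySem.Set.add_of_mem hb]

theorem nodup_keys_updA (d : PySem.Dict Int Int) (b a : Int) (h : d.keys.Nodup) :
    (updA d b a).keys.Nodup := by
  rw [keys_updA]; exact PySem.Set.nodup_add d.keys b h

theorem omin_updA (g : Int × Int → Option Int)
    (hg : ∀ b a a', a ≤ a' → ole (g (b, a)) (g (b, a')))
    (d : PySem.Dict Int Int) (b a : Int) (hnd : d.keys.Nodup) :
    omin ((updA d b a).items.map g) = pyMinOpt (omin (d.items.map g)) (g (b, a)) := by
  cases h : d.get? b with
  | none =>
    have hc : d.contains b = false := by rw [PySem.Dict.contains_eq_isSome_get?, h]; rfl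
    simp only [updA, h]
    rw [PySem.Dict.items_insert_of_not_contains d a hc, List.map_append, omin_append]
    simp only [List.map_cons, List.map_nil, omin, List.foldr_cons, List.foldr_nil,
      pyMinOpt_none_right]
  | some v =>
    have hc : d.contains b = true := by rw [PySem.Dict.contains_eq_isSome_get?, h]; rfl
    have hmem : (b, v) ∈ d.items := PySem.Dict.mem_items_of_get?_eq_some d h
    obtain ⟨sl, tl, hst⟩ := List.append_of_mem hmem
    have hkeys : d.keys = sl.map Prod.fst ++ b :: tl.map Prod.fst := by
      simp [PySem.Dict.keys, hst]
    rw [hkeys] at hnd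
    have hnds := List.nodup_append.mp hnd
    have hs : ∀ p ∈ sl, p.1 ≠ b := fun p hp =>
      hnds.2.2 p.1 (List.mem_map_of_mem hp) b (by simp)
    have ht : ∀ p ∈ tl, p.1 ≠ b := fun p hp heq =>
      (List.nodup_cons.mp hnds.2.1).1 (heq ▸ List.mem_map_of_mem hp)
    simp only [updA, h]
    by_cases hv : v > a
    · simp only [if_pos hv]
      rw [PySem.Dict.items_insert_of_contains d a hc]
      have hmap : d.items.map (fun p => if (p.1 == b) = true then (b, a) else p)
          = sl ++ (b, a) :: tl := by
        rw [hst, List.map_append, List.map_cons]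
        have h1 : sl.map (fun p => if (p.1 == b) = true then ((b, a) : Int × Int) else p) = sl := by
          conv_rhs => rw [← List.map_id sl]
          exact List.map_congr_left (fun p hp => by simp [hs p hp])
        have h2 : tl.map (fun p => if (p.1 == b) = true then ((b, a) : Int × Int) else p) = tl := by
          conv_rhs => rw [← List.map_id tl]
          exact List.map_congr_left (fun p hp => by simp [ht p hp])
        rw [h1, h2]; simp
      rw [hmap, hst, List.map_append, List.map_append, List.map_cons, List.map_cons,
        omin_append, omin_append, omin_cons, omin_cons]
      exact (pyMinOpt_alg (hg b a v (le_of_lt hv))).symm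
    · simp only [if_neg hv]
      have h1 : ole (omin (d.items.map g)) (g (b, v)) :=
        omin_le_mem (List.mem_map_of_mem hmem)
      have h2 : ole (g (b, v)) (g (b, a)) := hg b v a (by omega)
      exact (pyMinOpt_absorb (ole_trans h1 h2)).symm

theorem omin_foldl_updA (g : Int × Int → Option Int)
    (hg : ∀ b a a', a ≤ a' → ole (g (b, a)) (g (b, a')))
    (cs : List (Int × Int)) :
    ∀ d : PySem.Dict Int Int, d.keys.Nodup →
      omin ((cs.foldl (fun nd c => updA nd c.1 c.2) d).items.map g) =
        pyMinOpt (omin (d.items.map g)) (omin (cs.map g)) := by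
  induction cs with
  | nil => intro d _; simp [omin, pyMinOpt_none_right]
  | cons c t ih =>
    intro d hnd
    simp only [List.foldl_cons, List.map_cons, omin_cons]
    rw [ih _ (nodup_keys_updA _ _ _ hnd), omin_updA g hg d c.1 c.2 hnd, pyMinOpt_assoc]

theorem nodup_foldl_updA (cs : List (Int × Int)) :
    ∀ d : PySem.Dict Int Int, d.keys.Nodup →
      (cs.foldl (fun nd c => updA nd c.1 c.2) d).keys.Nodup := by
  induction cs with
  | nil => intro d h; exact h
  | cons c t ih => intro d h; exact ih _ (nodup_keys_updA _ _ _ h)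

-- the candidate states one stored state (b_sum, a_sum) generates for one item
def cands (nn mm a_t b_t : Int) (p : Int × Int) : List (Int × Int) :=
  (if p.2 + a_t < nn ∧ p.1 < mm then [(p.1, p.2 + a_t)] else []) ++
    (if p.2 < nn ∧ p.1 + b_t < mm then [(p.1 + b_t, p.2)] else [])

theorem foldl_inner_eq_flatMap {α β γ : Type} (l : List α) (h : α → List β)
    (f : γ → β → γ) : ∀ init : γ,
    l.foldl (fun acc x => (h x).foldl f acc) init = (l.flatMap h).foldl f init := by
  induction l with
  | nil => intro init; rfl
  | cons x t ih => intro init; simp only [List.foldl_cons, List.flatMap_cons, List.foldl_append, ih]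

theorem stepA_eq (n m a_t b_t : Int) (dp : PySem.Dict Int Int) :
    stepA n m dp [a_t, b_t] =
      (dp.items.flatMap (cands n m a_t b_t)).foldl (fun nd c => updA nd c.1 c.2)
        PySem.Dict.empty := by
  simp only [stepA]
  rw [← foldl_inner_eq_flatMap]
  apply PySem.List.foldl_congr_mem
  intro nd p _
  simp only [cands]
  split_ifs <;> simp [List.foldl]

-- main invariant: A's remaining fold versus B's memoless value, per stored state
theorem mainA (n m : Int) (info : List (List Int)) (hpre : ∀ it ∈ info, it.length = 2) :
    ∀ dp : PySem.Dict Int Int, dp.keys.Nodup →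
      omin ((info.foldl (stepA n m) dp).values.map some) =
        omin (dp.items.map (fun p => pureB n m info p.2 p.1)) := by
  induction info with
  | nil =>
    intro dp _
    simp only [List.foldl_nil, PySem.Dict.values, List.map_map]
    rfl
  | cons item rest ih =>
    intro dp hnd
    have h2 : item.length = 2 := hpre item (by simp)
    obtain ⟨a_t, b_t, rfl⟩ := List.length_eq_two.mp h2
    have hprer : ∀ it ∈ rest, it.length = 2 := fun it h => hpre it (by simp [h])
    have hg : ∀ b a a', a ≤ a' →
        ole ((fun p : Int × Int => pureB n m rest p.2 p.1) (b, a))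
          ((fun p : Int × Int => pureB n m rest p.2 p.1) (b, a')) :=
      fun b a a' h => pure_mono n m rest a a' b h
    have hnd0 : (PySem.Dict.empty : PySem.Dict Int Int).keys.Nodup := by
      simp [PySem.Dict.keys_empty]
    have hnd2 : (stepA n m dp [a_t, b_t]).keys.Nodup := by
      rw [stepA_eq]; exact nodup_foldl_updA _ _ hnd0
    simp only [List.foldl_cons]
    rw [ih hprer _ hnd2, stepA_eq,
      omin_foldl_updA (fun p : Int × Int => pureB n m rest p.2 p.1) hg _ _ hnd0]
    have hempty : (PySem.Dict.empty : PySem.Dict Int Int).items = [] := rfl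
    rw [hempty, List.map_nil]
    show pyMinOpt (omin []) _ = _
    rw [show omin [] = none from rfl, pyMinOpt_none_left, omin_flatMap]
    congr 1
    apply List.map_congr_left
    intro p _
    by_cases hg1 : p.2 + a_t < n ∧ p.1 < m <;> by_cases hg2 : p.2 < n ∧ p.1 + b_t < m <;>
      simp [cands, pureB, hg1, hg2, omin_cons,
        pyMinOpt_none_right, pyMinOpt_none_left, show omin [] = none from rfl] <;>
      first
        | rfl
        | exact pyMinOpt_comm _ _

-- memoisation is sound: bestB returns the memoless value and keeps the memo coherent
def GoodMemo (info : List (List Int)) (nn mm : Int) (memo : Memo) : Prop :=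
  ∀ (l x y : Int) (v : Option Int), memo.get? (l, x, y) = some v →
    v = pureB nn mm (info.drop (info.length - l.toNat)) x y

theorem drop_suffix (info pre items : List (List Int)) (hsp : info = pre ++ items) :
    info.drop (info.length - (PySem.List.len items).toNat) = items := by
  subst hsp
  have h : (pre ++ items).length - (PySem.List.len items).toNat = pre.length := by
    simp [PySem.List.len_eq]
  rw [h, List.drop_left]

theorem good_insert (info : List (List Int)) (n m : Int) (pre items : List (List Int))
    (a b : Int) (memo : Memo) (hsp : info = pre ++ items)
    (hgd : GoodMemo info n m memo) (v : Option Int) (hval : v = pureB n m items a b) :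
    GoodMemo info n m (memo.insert (PySem.List.len items, a, b) v) := by
  intro l x y w hw
  rw [PySem.Dict.get?_insert] at hw
  by_cases hk : ((l, x, y) : Int × Int × Int) = (PySem.List.len items, a, b)
  · rw [if_pos hk] at hw
    cases hw
    have h1 := hk
    simp only [Prod.ext_iff] at h1
    obtain ⟨hl, hx, hy⟩ := h1
    subst hl hx hy
    rw [hval, drop_suffix info pre items hsp]
  · rw [if_neg hk] at hw
    exact hgd l x y w hw

theorem memoB (info : List (List Int)) (n m : Int) :
    ∀ (items pre : List (List Int)) (a b : Int) (memo : Memo),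
      info = pre ++ items → GoodMemo info n m memo →
      (bestB n m items a b memo).1 = pureB n m items a b ∧
        GoodMemo info n m (bestB n m items a b memo).2 := by
  intro items
  induction items with
  | nil =>
    intro pre a b memo hsp hgd
    rw [bestB.eq_def]
    cases hm : memo.get? (PySem.List.len ([] : List (List Int)), a, b) with
    | some r =>
      simp only [hm]
      refine ⟨?_, hgd⟩
      have h := hgd _ a b r hm
      rw [h, drop_suffix info pre [] hsp]
    | none =>
      simp only [hm]
      exact ⟨rfl, good_insert info n m pre [] a b memo hsp hgd (some a) rfl⟩
  | cons item rest ih =>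
    intro pre a b memo hsp hgd
    rw [bestB.eq_def]
    cases hm : memo.get? (PySem.List.len (item :: rest), a, b) with
    | some r =>
      simp only [hm]
      refine ⟨?_, hgd⟩
      have h := hgd _ a b r hm
      rw [h, drop_suffix info pre (item :: rest) hsp]
    | none =>
      simp only [hm]
      have hsp' : info = (pre ++ [item]) ++ rest := by simp [hsp]
      rcases item with _ | ⟨x, _ | ⟨y, _ | ⟨z, t⟩⟩⟩
      · exact ⟨by simp [pureB], hgd⟩
      · exact ⟨by simp [pureB], hgd⟩
      · by_cases hg1 : a + x < n ∧ b < m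
        · obtain ⟨hv1, hgd1⟩ := ih (pre ++ [[x, y]]) (a + x) b memo hsp' hgd
          by_cases hg2 : a < n ∧ b + y < m
          · obtain ⟨hv2, hgd2⟩ :=
              ih (pre ++ [[x, y]]) a (b + y) (bestB n m rest (a + x) b memo).2 hsp' hgd1
            constructor
            · simp [hg1, hg2, hv1, hv2, pureB]
            · refine good_insert info n m pre ([x, y] :: rest) a b _ hsp ?_ _ ?_
              · simpa [hg1, hg2] using hgd2
              · simp [hg1, hg2, hv1, hv2, pureB]
          · constructor
            · simp [hg1, hg2, hv1, pureB]
            · refine good_insert info n m pre ([x, y] :: rest) a b _ hsp ?_ _ ?_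
              · simpa [hg1, hg2] using hgd1
              · simp [hg1, hg2, hv1, pureB]
        · by_cases hg2 : a < n ∧ b + y < m
          · obtain ⟨hv2, hgd2⟩ := ih (pre ++ [[x, y]]) a (b + y) memo hsp' hgd
            constructor
            · simp [hg1, hg2, hv2, pureB]
            · refine good_insert info n m pre ([x, y] :: rest) a b _ hsp ?_ _ ?_
              · simpa [hg1, hg2] using hgd2
              · simp [hg1, hg2, hv2, pureB]
          · constructor
            · simp [hg1, hg2, pureB]
            · refine good_insert info n m pre ([x, y] :: rest) a b _ hsp ?_ _ ?_
              · simpa [hg1, hg2] using hgd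
              · simp [hg1, hg2, pureB]
      · exact ⟨by simp [pureB], hgd⟩

theorem omin_map_some (t : List Int) : ∀ x : Int, omin ((x :: t).map some) = some (t.foldl min x) := by
  induction t with
  | nil => intro x; rfl
  | cons y t' ih =>
    intro x
    simp only [List.map_cons] at *
    rw [omin_cons, ih y, pyMinOpt_some_some, List.foldl_cons]
    exact congrArg some List.foldl_assoc.symm

theorem min?_eq_omin (l : List Int) :
    PySem.List.min? l (fun x => x) = omin (l.map some) := by
  cases l with
  | nil => rfl
  | cons x t => rw [PySem.List.min?_id_cons, omin_map_some]

-- ===== VERDICT (by name: the statement is the Claim_ definition above) =====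
theorem solution_spec : Claim_equal_solution := by
  intro info n m _ hpre
  unfold Spec_solution
  have hnd0 : (PySem.Dict.empty.insert (0 : Int) (0 : Int)).keys.Nodup := by decide
  have hmain := mainA n m info hpre (PySem.Dict.empty.insert 0 0) hnd0
  have hitems : (PySem.Dict.empty.insert (0 : Int) (0 : Int)).items = [(0, 0)] := rfl
  rw [hitems] at hmain
  have hr : omin ([((0 : Int), (0 : Int))].map (fun p => pureB n m info p.2 p.1))
      = pureB n m info 0 0 := by
    simp [omin_cons, pyMinOpt_none_right, show omin [] = none from rfl]
  rw [hr] at hmain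
  have hgd0 : GoodMemo info n m PySem.Dict.empty := fun l x y v hv => by
    simp [PySem.Dict.get?_empty] at hv
  have hb := (memoB info n m info [] 0 0 PySem.Dict.empty (by simp) hgd0).1
  simp only [solution, solution_alt]
  rw [min?_eq_omin, hmain, hb]
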